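-- pv_equiv track=rewrite | github.com/armin3731/comsi | app_files/mathematical_funcs2.py | sort_for_Aras
-- ===== SOURCE A (Python) =====
-- def sort_for_Aras(input_file_list):
--     sort_order = ['Ref_Abundance','Ref_UPEX','Abundance_MATRIX','UPEX_MATRIX','_Dir_Influ_','Shortpath_Distant_','Shortpath_MSPs_','_InDir_Influ_','Total_Influence_','Dir_Influ_by_Metabolite','Community_Rank','Community_Weight_','Centrality_','COR_SparCC','COV_SparCC','Metabolite_interactions']
--     re_arrange_names = []
--     for each_sort_order_member in sort_order:
--         while (each_sort_order_member in '|'.join(input_file_list)):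
--             for each_input_file_list in input_file_list:
--                 if each_sort_order_member in each_input_file_list:
--                     re_arrange_names.append(each_input_file_list)
--                     input_file_list.remove(each_input_file_list)
--
--     return re_arrange_names
-- ===== SOURCE B (Python) =====
-- def sort_for_Aras(input_file_list):
--     sort_order = ['Ref_Abundance','Ref_UPEX','Abundance_MATRIX','UPEX_MATRIX','_Dir_Influ_','Shortpath_Distant_','Shortpath_MSPs_','_InDir_Influ_','Total_Influence_','Dir_Influ_by_Metabolite','Community_Rank','Community_Weight_','Centrality_','COR_SparCC','COV_SparCC','Metabolite_interactions']
--     buckets = [[] for _ in sort_order]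
--     for name in input_file_list:
--         for k, member in enumerate(sort_order):
--             if member in name:
--                 buckets[k].append(name)
--                 break
--     return [name for bucket in buckets for name in bucket]
-- ===== Notes on version B (the rewrite author's own statement) =====
-- stated objective: simpler
-- what changed: B makes one pass over the files, dropping each into the bucket of its first matching priority substring and concatenating the buckets, instead of A's per-category loop that repeatedly re-joins the remaining list, re-tests substrings and rescans with list.remove until the category drains; Pre_ excludes lists in which some category is the first match of more than two files, where the relative order A emits among those equal-priority files is an accidental artefact of removing from the list while iterating over it (B also does not mutate the input list, while A drains matched entries from it).
import Mathlib
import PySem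

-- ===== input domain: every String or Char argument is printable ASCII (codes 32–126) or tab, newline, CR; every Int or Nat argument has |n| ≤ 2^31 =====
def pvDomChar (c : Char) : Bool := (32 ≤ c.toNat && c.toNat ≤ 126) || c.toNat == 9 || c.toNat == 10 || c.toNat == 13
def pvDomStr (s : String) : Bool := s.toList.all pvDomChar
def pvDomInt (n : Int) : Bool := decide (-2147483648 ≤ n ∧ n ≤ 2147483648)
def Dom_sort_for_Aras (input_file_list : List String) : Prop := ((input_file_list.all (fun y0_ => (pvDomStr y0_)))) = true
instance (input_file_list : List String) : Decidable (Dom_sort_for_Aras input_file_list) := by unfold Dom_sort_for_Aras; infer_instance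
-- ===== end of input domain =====

set_option maxHeartbeats 1000000


-- B buckets each file under its first matching priority substring in one pass and concatenates
-- the buckets, instead of A's per-category join/substring/.remove rescans (return value only:
-- the Python A drains matched entries from its argument list in place, B does not mutate it).

-- ===== PORT A =====
def pvSortOrder : List String := ["Ref_Abundance","Ref_UPEX","Abundance_MATRIX","UPEX_MATRIX","_Dir_Influ_","Shortpath_Distant_","Shortpath_MSPs_","_InDir_Influ_","Total_Influence_","Dir_Influ_by_Metabolite","Community_Rank","Community_Weight_","Centrality_","COR_SparCC","COV_SparCC","Metabolite_interactions"]

-- termination helper for pvForA (cited in decreasing_by)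
theorem pvRemoveLen (l : List String) (x : String) (hx : x ∈ l) :
    ((PySem.List.remove? l x).getD l).length + 1 = l.length := by
  rw [PySem.List.remove?_eq_some_erase l x hx, Option.getD_some, List.length_erase_of_mem hx]
  have := List.length_pos_of_mem hx
  omega

-- `for each in lst: if m in each: acc.append(each); lst.remove(each)` — CPython iterator
-- semantics made explicit: `it` is the iterator's index into the live list; `lst.remove`
-- is PySem.List.remove? (the element just read is in the list, so `.getD` never defaults).
def pvForA (m : String) (it : Nat) (l : List String) (acc : List String) :
    List String × List String :=
  match h : l[it]? with
  | none => (acc, l)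
  | some x =>
    if PySem.Str.isIn m x then
      pvForA m (it + 1) ((PySem.List.remove? l x).getD l) (acc ++ [x])
    else
      pvForA m (it + 1) l acc
termination_by l.length - it
decreasing_by
  · have hlt : it < l.length := by
      by_contra hge
      rw [List.getElem?_eq_none (by omega)] at h
      simp at h
    have hx : x ∈ l := List.mem_of_getElem? h
    have := pvRemoveLen l x hx
    omega
  · have hlt : it < l.length := by
      by_contra hge
      rw [List.getElem?_eq_none (by omega)] at h
      simp at h
    omega

-- `while (member in '|'.join(lst)): <for-loop pass>`; fuel = lst.length + 1 at entry,
-- which suffices since every iteration under a true condition removes at least one element.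
def pvWhileA (m : String) (fuel : Nat) (l : List String) (acc : List String) :
    List String × List String :=
  match fuel with
  | 0 => (acc, l)  -- unreachable with fuel = l.length + 1
  | fuel + 1 =>
    if PySem.Str.isIn m (PySem.Str.join "|" l) then
      let p := pvForA m 0 l acc
      pvWhileA m fuel p.2 p.1
    else (acc, l)

def sort_for_Aras (input_file_list : List String) : List String :=
  (pvSortOrder.foldl (fun st m => pvWhileA m (st.2.length + 1) st.2 st.1)
    (([] : List String), input_file_list)).1

-- ===== PORT B =====
-- buckets[k].append(f)  (Source B: buckets[k].append(name))
def pvAddToBucket (bs : List (List String)) (k : Nat) (f : String) : List (List String) :=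
  match bs, k with
  | [], _ => []
  | b :: rest, 0 => (b ++ [f]) :: rest
  | b :: rest, k + 1 => b :: pvAddToBucket rest k f

-- `for k, member in enumerate(sort_order): if member in name: buckets[k].append(name); break`
def pvPlace (order : List String) (k : Nat) (f : String) (bs : List (List String)) :
    List (List String) :=
  match order with
  | [] => bs
  | m :: rest => if PySem.Str.isIn m f then pvAddToBucket bs k f else pvPlace rest (k + 1) f bs

def sort_for_Aras_alt (input_file_list : List String) : List String :=
  (input_file_list.foldl (fun bs f => pvPlace pvSortOrder 0 f bs)
    (pvSortOrder.map (fun _ => ([] : List String)))).flatten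

-- ===== PRECONDITION & SPEC =====
-- index of the first sort_order member contained in f, or order.length if none (used by Pre_ and the proofs only)
def pvFirstKey (order : List String) (f : String) : Nat :=
  match order with
  | [] => 0
  | m :: rest => if PySem.Str.isIn m f then 0 else pvFirstKey rest f + 1

-- Pre_ excludes lists in which some priority category is the first match of more than two files:
-- among such equal-priority files the order A emits is an accidental artefact of removing from
-- the list while iterating over it (skipped elements are picked up on a later sweep).
def Pre_sort_for_Aras (input_file_list : List String) : Prop :=
  ∀ k ∈ List.range pvSortOrder.length,
    input_file_list.countP (fun f => pvFirstKey pvSortOrder f == k) ≤ 2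
instance (input_file_list : List String) : Decidable (Pre_sort_for_Aras input_file_list) := by
  unfold Pre_sort_for_Aras; infer_instance

def pvWitness_sort_for_Aras : List String :=
  ["Ref_UPEX", "b.txt"]

def Spec_sort_for_Aras (input_file_list : List String) (out : List String) : Prop :=
  out = sort_for_Aras_alt input_file_list
instance (input_file_list : List String) (out : List String) :
    Decidable (Spec_sort_for_Aras input_file_list out) := by
  unfold Spec_sort_for_Aras; infer_instance

-- ===== CLAIM (what is proved, stated in full; the proofs are below) =====
def Claim_equal_sort_for_Aras : Prop := ∀ (input_file_list : List String), Dom_sort_for_Aras input_file_list → Pre_sort_for_Aras input_file_list → Spec_sort_for_Aras input_file_list (sort_for_Aras input_file_list)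

-- ===== LEMMAS AND PROOFS =====

-- ---- first-key characterisation ----
theorem pv_firstKey_le (order : List String) (f : String) (c : Nat) (hc : c < order.length)
    (h : PySem.Str.isIn (order[c]'hc) f = true) : pvFirstKey order f ≤ c := by
  induction order generalizing c with
  | nil => simp at hc
  | cons m rest ih =>
    by_cases hm : PySem.Str.isIn m f = true
    · have e : pvFirstKey (m :: rest) f = 0 := by
        simp only [pvFirstKey]; rw [if_pos hm]
      omega
    · have hb : ¬ PySem.Str.isIn m f = true := hm
      have e : pvFirstKey (m :: rest) f = pvFirstKey rest f + 1 := by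
        simp only [pvFirstKey]; rw [if_neg hb]
      cases c with
      | zero => simp at h; exact absurd h hm
      | succ c' =>
        simp only [List.getElem_cons_succ] at h
        have := ih c' (by simp at hc; omega) h
        omega

theorem pv_firstKey_isIn (order : List String) (f : String)
    (hlt : pvFirstKey order f < order.length) :
    PySem.Str.isIn (order[pvFirstKey order f]'hlt) f = true := by
  induction order with
  | nil => simp at hlt
  | cons m rest ih =>
    by_cases hm : PySem.Str.isIn m f = true
    · have e : pvFirstKey (m :: rest) f = 0 := by
        simp only [pvFirstKey]; rw [if_pos hm]
      simp only [e, List.getElem_cons_zero]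
      exact hm
    · have e : pvFirstKey (m :: rest) f = pvFirstKey rest f + 1 := by
        simp only [pvFirstKey]; rw [if_neg hm]
      have hlt' : pvFirstKey rest f < rest.length := by
        rw [e] at hlt; simp at hlt; omega
      simp only [e, List.getElem_cons_succ]
      exact ih hlt'

theorem pv_key_iff (c : Nat) (hc : c < pvSortOrder.length) (f : String)
    (hge : c ≤ pvFirstKey pvSortOrder f) :
    (PySem.Str.isIn (pvSortOrder[c]'hc) f = true) ↔ pvFirstKey pvSortOrder f = c := by
  constructor
  · intro h
    have := pv_firstKey_le pvSortOrder f c hc h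
    omega
  · intro h
    have hlt : pvFirstKey pvSortOrder f < pvSortOrder.length := by omega
    have := pv_firstKey_isIn pvSortOrder f hlt
    simpa [h] using this

-- ---- '|'.join membership = any-member membership ----
theorem pv_infix_split (p a b : List Char) (c : Char) (hp : p ≠ []) (hc : c ∉ p) :
    p <:+: (a ++ c :: b) ↔ p <:+: a ∨ p <:+: b := by
  constructor
  · rintro ⟨s, t, h⟩
    by_cases h1 : s.length + p.length ≤ a.length
    · left
      have hsp : s ++ p <+: a ++ c :: b := ⟨t, by simpa [List.append_assoc] using h⟩
      have ha : a <+: a ++ c :: b := ⟨c :: b, rfl⟩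
      obtain ⟨t', ht'⟩ := List.prefix_of_prefix_length_le hsp ha (by simpa using h1)
      exact ⟨s, t', by simpa [List.append_assoc] using ht'⟩
    · by_cases h2 : a.length + 1 ≤ s.length
      · right
        have hst : p ++ t <:+ a ++ c :: b := ⟨s, by simpa [List.append_assoc] using h⟩
        have hb : b <:+ a ++ c :: b := ⟨a ++ [c], by simp⟩
        have hlen : (p ++ t).length ≤ b.length := by
          have hl := congrArg List.length h
          simp at hl ⊢
          omega
        obtain ⟨s', hs'⟩ := List.suffix_of_suffix_length_le hst hb hlen
        exact ⟨s', t, by simpa [List.append_assoc] using hs'⟩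
      · exfalso
        have h' := congrArg (fun u => u[a.length]?) h
        simp only at h'
        rw [List.getElem?_append_left (by simp; omega : a.length < (s ++ p).length)] at h'
        rw [List.getElem?_append_right (by omega : s.length ≤ a.length)] at h'
        rw [List.getElem?_append_right (le_refl a.length)] at h'
        simp only [Nat.sub_self, List.getElem?_cons_zero] at h'
        exact hc (List.mem_of_getElem? h')
  · rintro (h | h)
    · exact h.trans ((List.prefix_append a (c :: b)).isInfix)
    · refine h.trans ?_
      exact ⟨a ++ [c], [], by simp⟩

theorem pv_infix_join (p : List Char) (c : Char) (hp : p ≠ []) (hc : c ∉ p)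
    (parts : List (List Char)) :
    p <:+: PySem.Chars.join [c] parts ↔ ∃ x ∈ parts, p <:+: x := by
  induction parts with
  | nil =>
    rw [PySem.Chars.join_nil]
    simp [hp]
  | cons x rest ih =>
    cases rest with
    | nil => simp [PySem.Chars.join_singleton]
    | cons y rest' =>
      rw [PySem.Chars.join_cons_cons]
      rw [show x ++ [c] ++ PySem.Chars.join [c] (y :: rest')
            = x ++ c :: PySem.Chars.join [c] (y :: rest') from by simp]
      rw [pv_infix_split p x _ c hp hc, ih]
      constructor
      · rintro (h | ⟨z, hz, h⟩)
        · exact ⟨x, by simp, h⟩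
        · exact ⟨z, by simp [hz], h⟩
      · rintro ⟨z, hz, h⟩
        rcases List.mem_cons.mp hz with rfl | hz'
        · exact Or.inl h
        · exact Or.inr ⟨z, hz', h⟩

theorem pv_isIn_join (m : String) (l : List String) (hp : m.toList ≠ [])
    (hc : '|' ∉ m.toList) :
    PySem.Str.isIn m (PySem.Str.join "|" l) = l.any (fun f => PySem.Str.isIn m f) := by
  rw [Bool.eq_iff_iff, PySem.Str.isIn_iff_infix, PySem.Str.toList_join]
  rw [show ("|" : String).toList = ['|'] from rfl]
  rw [pv_infix_join m.toList '|' hp hc]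
  rw [List.any_eq_true]
  constructor
  · rintro ⟨x, hx, h⟩
    obtain ⟨f, hf, rfl⟩ := List.mem_map.mp hx
    exact ⟨f, hf, (PySem.Str.isIn_iff_infix m f).mpr h⟩
  · rintro ⟨f, hf, h⟩
    exact ⟨f.toList, List.mem_map.mpr ⟨f, hf, rfl⟩, (PySem.Str.isIn_iff_infix m f).mp h⟩

theorem pv_members_ok : ∀ m ∈ pvSortOrder, m.toList ≠ [] ∧ '|' ∉ m.toList := by decide

-- ---- proof-side description of one of A's for-loop passes over keyed pairs:
-- taking an element removes it and moves the immediately following element straight to kept ----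
def pvOnePass (c : Nat) (rem : List (String × Nat)) :
    List String × List (String × Nat) :=
  match rem with
  | [] => ([], [])
  | p :: rest =>
    if p.2 = c then
      match rest with
      | [] => ([p.1], [])
      | q :: rest' =>
        let r := pvOnePass c rest'
        (p.1 :: r.1, q :: r.2)
    else
      let r := pvOnePass c rest
      (r.1, p :: r.2)

theorem pv_onePass_spec (c : Nat) :
    ∀ (n : Nat) (rem : List (String × Nat)), rem.length ≤ n →
      List.Sublist (pvOnePass c rem).2 rem
      ∧ (pvOnePass c rem).1.length + (pvOnePass c rem).2.length = rem.length
      ∧ ((pvOnePass c rem).1 = [] ↔ ∀ p ∈ rem, p.2 ≠ c) := by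
  intro n
  induction n with
  | zero =>
    intro rem h
    match rem with
    | [] => simp [pvOnePass]
    | p :: rest => exact absurd h (by simp)
  | succ n ih =>
    intro rem hlen
    match rem with
    | [] => simp [pvOnePass]
    | p :: rest =>
      by_cases hpc : p.2 = c
      · match rest with
        | [] =>
          rw [show pvOnePass c [p] = ([p.1], []) from by simp [pvOnePass, hpc]]
          refine ⟨by simp, by simp, ?_⟩
          exact ⟨fun h => absurd h (by simp), fun h => absurd hpc (h p (by simp))⟩
        | q :: rest' =>
          obtain ⟨h1, h2, h3⟩ := ih rest' (by simp at hlen; omega)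
          rw [show pvOnePass c (p :: q :: rest')
                = (p.1 :: (pvOnePass c rest').1, q :: (pvOnePass c rest').2) from by
              simp [pvOnePass, hpc]]
          refine ⟨?_, by simp at h2 ⊢; omega, ?_⟩
          · exact List.Sublist.cons _ (List.Sublist.cons₂ _ h1)
          · exact ⟨fun h => absurd h (by simp), fun h => absurd hpc (h p (by simp))⟩
      · obtain ⟨h1, h2, h3⟩ := ih rest (by simp at hlen; omega)
        rw [show pvOnePass c (p :: rest)
              = ((pvOnePass c rest).1, p :: (pvOnePass c rest).2) from by
            rw [pvOnePass.eq_def]; simp [hpc]]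
        refine ⟨List.Sublist.cons₂ _ h1, by simp at h2 ⊢; omega, ?_⟩
        rw [h3]
        simp [hpc]

-- kept elements with other keys are exactly rem's elements with other keys, in order
theorem pv_onePass_keepNe (c : Nat) :
    ∀ (n : Nat) (rem : List (String × Nat)), rem.length ≤ n →
      (pvOnePass c rem).2.filter (fun p => !(p.2 == c))
        = rem.filter (fun p => !(p.2 == c)) := by
  intro n
  induction n with
  | zero =>
    intro rem h
    match rem with
    | [] => simp [pvOnePass]
    | p :: rest => exact absurd h (by simp)
  | succ n ih =>
    intro rem hlen
    match rem with
    | [] => simp [pvOnePass]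
    | p :: rest =>
      by_cases hpc : p.2 = c
      · match rest with
        | [] => simp [pvOnePass, hpc]
        | q :: rest' =>
          rw [show pvOnePass c (p :: q :: rest')
                = (p.1 :: (pvOnePass c rest').1, q :: (pvOnePass c rest').2) from by
              simp [pvOnePass, hpc]]
          simp only [List.filter_cons]
          rw [ih rest' (by simp at hlen; omega)]
          simp [hpc]
      · rw [show pvOnePass c (p :: rest)
              = ((pvOnePass c rest).1, p :: (pvOnePass c rest).2) from by
            rw [pvOnePass.eq_def]; simp [hpc]]
        simp only [List.filter_cons]
        rw [ih rest (by simp at hlen; omega)]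

-- with at most two key-c elements, a pass takes a PREFIX of them (nobody is overtaken)
theorem pv_onePass_prefix (c : Nat) :
    ∀ (n : Nat) (rem : List (String × Nat)), rem.length ≤ n →
      rem.countP (fun p => p.2 == c) ≤ 2 →
      (pvOnePass c rem).1 ++ ((pvOnePass c rem).2.filter (fun p => p.2 == c)).map Prod.fst
        = (rem.filter (fun p => p.2 == c)).map Prod.fst := by
  intro n
  induction n with
  | zero =>
    intro rem h _
    match rem with
    | [] => simp [pvOnePass]
    | p :: rest => exact absurd h (by simp)
  | succ n ih =>
    intro rem hlen hcnt
    match rem with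
    | [] => simp [pvOnePass]
    | p :: rest =>
      by_cases hpc : p.2 = c
      · match rest with
        | [] => simp [pvOnePass, hpc]
        | q :: rest' =>
          rw [show pvOnePass c (p :: q :: rest')
                = (p.1 :: (pvOnePass c rest').1, q :: (pvOnePass c rest').2) from by
              simp [pvOnePass, hpc]]
          by_cases hqc : q.2 = c
          · -- two key-c elements already seen: rest' has none
            have hz : rest'.countP (fun p => p.2 == c) = 0 := by
              have h2 := hcnt
              rw [List.countP_cons, List.countP_cons, if_pos (by simpa using hqc),
                if_pos (by simpa using hpc)] at h2
              omega
            have hall : ∀ r ∈ rest', ¬ r.2 = c := by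
              intro r hr hrc
              have := List.countP_eq_zero.mp hz r hr
              simp [hrc] at this
            obtain ⟨hsub, _, hnil⟩ := pv_onePass_spec c rest'.length rest' (le_refl _)
            have ht : (pvOnePass c rest').1 = [] := hnil.mpr hall
            have hk : (pvOnePass c rest').2.filter (fun p => p.2 == c) = [] := by
              apply List.filter_eq_nil_iff.mpr
              intro r hr
              have := hall r (hsub.mem hr)
              simp [this]
            have hrf : rest'.filter (fun p => p.2 == c) = [] := by
              apply List.filter_eq_nil_iff.mpr
              intro r hr
              have := hall r hr
              simp [this]
            simp [List.filter_cons, hpc, hqc, ht, hk, hrf]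
          · have hrec := ih rest' (by simp at hlen; omega)
              (by
                have h2 := hcnt
                rw [List.countP_cons, List.countP_cons, if_neg (by simpa using hqc),
                  if_pos (by simpa using hpc)] at h2
                omega)
            have e1 : (p :: q :: rest').filter (fun p => p.2 == c)
                = p :: rest'.filter (fun p => p.2 == c) := by
              simp [List.filter_cons, hpc, hqc]
            have e2 : (q :: (pvOnePass c rest').2).filter (fun p => p.2 == c)
                = (pvOnePass c rest').2.filter (fun p => p.2 == c) := by
              simp [List.filter_cons, hqc]
            rw [e1, e2]
            simp only [List.map_cons, List.cons_append]
            rw [hrec]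
      · rw [show pvOnePass c (p :: rest)
              = ((pvOnePass c rest).1, p :: (pvOnePass c rest).2) from by
            rw [pvOnePass.eq_def]; simp [hpc]]
        have hrec := ih rest (by simp at hlen; omega)
          (by
            have h2 := hcnt
            rw [List.countP_cons, if_neg (by simpa using hpc)] at h2
            omega)
        have e1 : (p :: rest).filter (fun p => p.2 == c)
            = rest.filter (fun p => p.2 == c) := by
          simp [List.filter_cons, hpc]
        have e2 : (p :: (pvOnePass c rest).2).filter (fun p => p.2 == c)
            = (pvOnePass c rest).2.filter (fun p => p.2 == c) := by
          simp [List.filter_cons, hpc]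
        rw [e1, e2]
        exact hrec

-- ---- list.remove at the iterator position ----
theorem pv_remove_here (pre rest : List String) (x : String) (hx : x ∉ pre) :
    (PySem.List.remove? (pre ++ x :: rest) x).getD (pre ++ x :: rest) = pre ++ rest := by
  rw [PySem.List.remove?_eq_some_erase _ x (by simp), Option.getD_some]
  rw [List.erase_append_right _ hx]
  simp

-- ---- A's for-loop pass = pvOnePass (invariant: at most one skipped match sits in pre,
-- and then no match remains in suf) ----
theorem pv_passA_eq (m : String) (c : Nat)
    (hkeyiff : ∀ f : String, c ≤ pvFirstKey pvSortOrder f →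
      (PySem.Str.isIn m f = true ↔ pvFirstKey pvSortOrder f = c)) :
    ∀ (n : Nat) (suf : List (String × Nat)), suf.length ≤ n →
    ∀ (pre acc : List String),
    (∀ p ∈ suf, p.2 = pvFirstKey pvSortOrder p.1) →
    (∀ p ∈ suf, c ≤ p.2) →
    ((pre.countP (fun f => PySem.Str.isIn m f) = 0
        ∧ suf.countP (fun p => p.2 == c) ≤ 2) ∨
     (pre.countP (fun f => PySem.Str.isIn m f) = 1
        ∧ suf.countP (fun p => p.2 == c) = 0)) →
    pvForA m pre.length (pre ++ suf.map Prod.fst) acc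
      = (acc ++ (pvOnePass c suf).1, pre ++ (pvOnePass c suf).2.map Prod.fst) := by
  intro n
  induction n with
  | zero =>
    intro suf hlen pre acc _ _ _
    match suf with
    | [] =>
      rw [pvForA]
      split
      next heq => simp [pvOnePass]
      next x heq =>
        exfalso
        rw [List.map_nil, List.append_nil, List.getElem?_eq_none (le_refl pre.length)] at heq
        simp at heq
    | p :: rest => exact absurd hlen (by simp)
  | succ n ih =>
    intro suf hlen pre acc htag hkey hinv
    match suf with
    | [] =>
      rw [pvForA]
      split
      next heq => simp [pvOnePass]
      next x heq =>
        exfalso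
        rw [List.map_nil, List.append_nil, List.getElem?_eq_none (le_refl pre.length)] at heq
        simp at heq
    | p :: rest =>
      have hget : (pre ++ (p :: rest).map Prod.fst)[pre.length]? = some p.1 := by
        rw [List.getElem?_append_right (le_refl pre.length)]
        simp
      rw [pvForA]
      split
      next heq => exfalso; rw [hget] at heq; simp at heq
      next x heq =>
        rw [hget] at heq
        injection heq with hx
        subst hx
        by_cases hpc : p.2 = c
        · -- matched element: A takes it and removes it at the iterator position
          have hfk : pvFirstKey pvSortOrder p.1 = c := by
            rw [← htag p (by simp)]; exact hpc
          have hin : PySem.Str.isIn m p.1 = true :=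
            (hkeyiff p.1 (by omega)).mpr hfk
          have hcnt1 : 1 ≤ (p :: rest).countP (fun p => p.2 == c) := by
            rw [List.countP_cons, if_pos (by simpa using hpc)]
            omega
          have hinvL : pre.countP (fun f => PySem.Str.isIn m f) = 0
              ∧ (p :: rest).countP (fun p => p.2 == c) ≤ 2 := by
            rcases hinv with h | h
            · exact h
            · omega
          have hxpre : p.1 ∉ pre := by
            intro hmem
            exact (List.countP_eq_zero.mp hinvL.1 p.1 hmem) hin
          rw [if_pos hin]
          rw [show pre ++ (p :: rest).map Prod.fst = pre ++ p.1 :: rest.map Prod.fst from by simp]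
          rw [pv_remove_here pre (rest.map Prod.fst) p.1 hxpre]
          cases rest with
          | nil =>
            rw [pvForA]
            split
            next heq2 =>
              rw [show pvOnePass c [p] = ([p.1], []) from by simp [pvOnePass, hpc]]
            next y heq2 =>
              exfalso
              rw [List.map_nil, List.append_nil, List.getElem?_eq_none (by omega)] at heq2
              simp at heq2
          | cons q rest' =>
            have hqk : c ≤ pvFirstKey pvSortOrder q.1 := by
              rw [← htag q (by simp)]; exact hkey q (by simp)
            have hinv' : ((pre ++ [q.1]).countP (fun f => PySem.Str.isIn m f) = 0
                  ∧ rest'.countP (fun p => p.2 == c) ≤ 2) ∨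
                ((pre ++ [q.1]).countP (fun f => PySem.Str.isIn m f) = 1
                  ∧ rest'.countP (fun p => p.2 == c) = 0) := by
              by_cases hqc : q.2 = c
              · right
                have hqin : PySem.Str.isIn m q.1 = true := by
                  refine (hkeyiff q.1 hqk).mpr ?_
                  rw [← htag q (by simp)]; exact hqc
                constructor
                · rw [List.countP_append, hinvL.1]
                  simp
                  simpa using hqin
                · have := hinvL.2
                  rw [List.countP_cons, List.countP_cons, if_pos (by simpa using hqc),
                    if_pos (by simpa using hpc)] at this
                  omega
              · left
                have hqin : ¬ PySem.Str.isIn m q.1 = true := by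
                  intro hmm
                  have := (hkeyiff q.1 hqk).mp hmm
                  rw [← htag q (by simp)] at this
                  exact hqc this
                constructor
                · rw [List.countP_append, hinvL.1]
                  simp
                  simpa using hqin
                · have := hinvL.2
                  rw [List.countP_cons, List.countP_cons, if_neg (by simpa using hqc),
                    if_pos (by simpa using hpc)] at this
                  omega
            rw [show pre ++ (q :: rest').map Prod.fst = (pre ++ [q.1]) ++ rest'.map Prod.fst
              from by simp]
            rw [show pre.length + 1 = (pre ++ [q.1]).length from by simp]
            rw [ih rest' (by simp at hlen; omega) (pre ++ [q.1]) (acc ++ [p.1])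
                (fun r hr => htag r (by simp [hr]))
                (fun r hr => hkey r (by simp [hr]))
                hinv']
            rw [show pvOnePass c (p :: q :: rest')
                  = (p.1 :: (pvOnePass c rest').1, q :: (pvOnePass c rest').2) from by
                simp [pvOnePass, hpc]]
            simp
        · -- unmatched element: A keeps it and just advances the iterator
          have hin : ¬ PySem.Str.isIn m p.1 = true := by
            intro hmm
            have h1 : c ≤ pvFirstKey pvSortOrder p.1 := by
              rw [← htag p (by simp)]; exact hkey p (by simp)
            have := (hkeyiff p.1 h1).mp hmm
            rw [← htag p (by simp)] at this
            exact hpc this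
          have hinv' : ((pre ++ [p.1]).countP (fun f => PySem.Str.isIn m f) = 0
                ∧ rest.countP (fun p => p.2 == c) ≤ 2) ∨
              ((pre ++ [p.1]).countP (fun f => PySem.Str.isIn m f) = 1
                ∧ rest.countP (fun p => p.2 == c) = 0) := by
            rcases hinv with ⟨h1, h2⟩ | ⟨h1, h2⟩
            · left
              constructor
              · rw [List.countP_append, h1]
                simp
                simpa using hin
              · rw [List.countP_cons, if_neg (by simpa using hpc)] at h2; omega
            · right
              constructor
              · rw [List.countP_append, h1]
                simp
                simpa using hin
              · rw [List.countP_cons, if_neg (by simpa using hpc)] at h2; omega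
          rw [if_neg hin]
          rw [show pre ++ (p :: rest).map Prod.fst = (pre ++ [p.1]) ++ rest.map Prod.fst
            from by simp]
          rw [show pre.length + 1 = (pre ++ [p.1]).length from by simp]
          rw [ih rest (by simp at hlen; omega) (pre ++ [p.1]) acc
              (fun r hr => htag r (by simp [hr]))
              (fun r hr => hkey r (by simp [hr]))
              hinv']
          rw [show pvOnePass c (p :: rest)
                = ((pvOnePass c rest).1, p :: (pvOnePass c rest).2) from by
              rw [pvOnePass.eq_def]; simp [hpc]]
          simp

-- ---- A's while loop takes exactly the key-c elements, in input order ----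
theorem pv_while_filter (c : Nat) (hc : c < pvSortOrder.length) :
    ∀ (fuelA : Nat) (rem : List (String × Nat)) (acc : List String),
      rem.length < fuelA →
      (∀ p ∈ rem, p.2 = pvFirstKey pvSortOrder p.1) →
      (∀ p ∈ rem, c ≤ p.2) →
      rem.countP (fun p => p.2 == c) ≤ 2 →
      pvWhileA (pvSortOrder[c]'hc) fuelA (rem.map Prod.fst) acc
        = (acc ++ (rem.filter (fun p => p.2 == c)).map Prod.fst,
           (rem.filter (fun p => !(p.2 == c))).map Prod.fst) := by
  intro fuelA
  induction fuelA with
  | zero => intro rem acc hA; omega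
  | succ fuelA ih =>
    intro rem acc hA htag hkey hcnt
    have hm := pv_members_ok (pvSortOrder[c]'hc) (List.getElem_mem hc)
    have hkeyiff : ∀ f : String, c ≤ pvFirstKey pvSortOrder f →
        (PySem.Str.isIn (pvSortOrder[c]'hc) f = true ↔ pvFirstKey pvSortOrder f = c) :=
      fun f hf => pv_key_iff c hc f hf
    obtain ⟨hsub1, hlen1, hnil1⟩ := pv_onePass_spec c rem.length rem (le_refl _)
    have hcond : PySem.Str.isIn (pvSortOrder[c]'hc) (PySem.Str.join "|" (rem.map Prod.fst)) = true
        ↔ ¬ (pvOnePass c rem).1 = [] := by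
      rw [pv_isIn_join _ _ hm.1 hm.2, List.any_eq_true, hnil1]
      constructor
      · rintro ⟨f, hf, hin⟩ hall
        obtain ⟨p, hp, rfl⟩ := List.mem_map.mp hf
        have h1 : c ≤ pvFirstKey pvSortOrder p.1 := by
          rw [← htag p hp]; exact hkey p hp
        have h2 := (hkeyiff p.1 h1).mp hin
        exact hall p hp (by rw [htag p hp]; exact h2)
      · intro hne
        push_neg at hne
        obtain ⟨p, hp, hpc⟩ := hne
        refine ⟨p.1, List.mem_map.mpr ⟨p, hp, rfl⟩, ?_⟩
        have h1 : c ≤ pvFirstKey pvSortOrder p.1 := by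
          rw [← htag p hp]; exact hkey p hp
        exact (hkeyiff p.1 h1).mpr (by rw [← htag p hp]; exact hpc)
    by_cases hc2 : (pvOnePass c rem).1 = []
    · -- no match left: the loop stops immediately
      have hcf : ¬ PySem.Str.isIn (pvSortOrder[c]'hc)
          (PySem.Str.join "|" (rem.map Prod.fst)) = true := by
        intro hx
        exact (hcond.mp hx) hc2
      have hall := hnil1.mp hc2
      have hfe : rem.filter (fun p => p.2 == c) = [] := by
        apply List.filter_eq_nil_iff.mpr
        intro r hr
        have := hall r hr
        simp [this]
      have hfs : rem.filter (fun p => !(p.2 == c)) = rem := by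
        apply List.filter_eq_self.mpr
        intro r hr
        have := hall r hr
        simp [this]
      rw [pvWhileA, if_neg hcf, hfe, hfs]
      simp
    · -- a match remains: one pass, then recurse on the kept list
      have hct : PySem.Str.isIn (pvSortOrder[c]'hc)
          (PySem.Str.join "|" (rem.map Prod.fst)) = true := hcond.mpr hc2
      have hpass := pv_passA_eq (pvSortOrder[c]'hc) c hkeyiff rem.length rem (le_refl _)
        [] acc htag hkey (Or.inl ⟨by simp, hcnt⟩)
      simp only [List.nil_append, List.length_nil] at hpass
      have htk : 1 ≤ (pvOnePass c rem).1.length := by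
        cases hx : (pvOnePass c rem).1 with
        | nil => exact absurd hx hc2
        | cons a b => simp [hx]
      have hrec := ih (pvOnePass c rem).2 (acc ++ (pvOnePass c rem).1)
        (by omega)
        (fun p hp => htag p (hsub1.mem hp))
        (fun p hp => hkey p (hsub1.mem hp))
        (le_trans hsub1.countP_le hcnt)
      rw [pvWhileA, if_pos hct]
      rw [hpass]
      rw [hrec]
      rw [pv_onePass_keepNe c rem.length rem (le_refl _)]
      rw [List.append_assoc, pv_onePass_prefix c rem.length rem (le_refl _) hcnt]

-- ---- the outer fold over categories yields category-filtered segments in order ----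
theorem pv_fold_filter :
    ∀ (d k : Nat), k + d = pvSortOrder.length →
    ∀ (rem : List (String × Nat)) (acc : List String),
    (∀ p ∈ rem, p.2 = pvFirstKey pvSortOrder p.1) →
    (∀ p ∈ rem, k ≤ p.2) →
    (∀ c, c < pvSortOrder.length → rem.countP (fun p => p.2 == c) ≤ 2) →
    ((pvSortOrder.drop k).foldl (fun st m => pvWhileA m (st.2.length + 1) st.2 st.1)
        (acc, rem.map Prod.fst)).1
      = acc ++ (List.range' k d).flatMap
          (fun c => (rem.filter (fun p => p.2 == c)).map Prod.fst) := by
  intro d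
  induction d with
  | zero =>
    intro k hk rem acc _ _ _
    rw [List.drop_eq_nil_of_le (by omega)]
    simp
  | succ d ih =>
    intro k hk rem acc htag hkey hcnt
    have hklt : k < pvSortOrder.length := by omega
    rw [List.drop_eq_getElem_cons hklt, List.range'_succ]
    simp only [List.foldl_cons, List.length_map]
    rw [pv_while_filter k hklt (rem.length + 1) rem acc (by omega) htag hkey (hcnt k hklt)]
    have hrec := ih (k + 1) (by omega) (rem.filter (fun p => !(p.2 == k)))
      (acc ++ (rem.filter (fun p => p.2 == k)).map Prod.fst)
      (fun p hp => htag p (List.mem_of_mem_filter hp))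
      (fun p hp => by
        have h1 := hkey p (List.mem_of_mem_filter hp)
        have h2 := List.of_mem_filter hp
        simp at h2
        omega)
      (fun c hc => le_trans List.filter_sublist.countP_le (hcnt c hc))
    rw [hrec]
    rw [List.flatMap_cons, List.append_assoc]
    congr 2
    apply List.flatMap_congr  -- if missing, replaced below
    intro c hcmem
    have hck : k + 1 ≤ c := by
      have := List.mem_range'_1.mp hcmem
      omega
    rw [List.filter_filter]
    congr 1
    apply List.filter_congr
    intro p _
    by_cases hpc : p.2 = c
    · simp [hpc]; omega
    · simp [hpc]

-- filtering the keyed pairs is filtering the files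
theorem pv_pairs_filter (l : List String) (c : Nat) :
    ((l.map (fun f => (f, pvFirstKey pvSortOrder f))).filter
        (fun p => p.2 == c)).map Prod.fst
      = l.filter (fun f => pvFirstKey pvSortOrder f == c) := by
  rw [List.filter_map, List.map_map]
  simp [Function.comp_def]

-- ---- B's bucket fold characterised ----
theorem pv_place_eq (f : String) :
    ∀ (order : List String) (k : Nat) (bs : List (List String)),
    pvPlace order k f bs
      = if pvFirstKey order f < order.length
          then pvAddToBucket bs (k + pvFirstKey order f) f else bs := by
  intro order
  induction order with
  | nil => intro k bs; simp [pvPlace, pvFirstKey]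
  | cons m rest ih =>
    intro k bs
    by_cases hm : PySem.Str.isIn m f = true
    · have hm2 : PySem.Chars.isIn m.toList f.toList = true := by simpa using hm
      simp [pvPlace, pvFirstKey, hm2]
    · have hm2 : PySem.Chars.isIn m.toList f.toList = false := by simpa using hm
      have e : pvFirstKey (m :: rest) f = pvFirstKey rest f + 1 := by
        simp only [pvFirstKey]; rw [if_neg hm]
      rw [show pvPlace (m :: rest) k f bs = pvPlace rest (k + 1) f bs from by
        simp [pvPlace, hm2]]
      rw [ih (k + 1) bs, e]
      by_cases hlt : pvFirstKey rest f < rest.length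
      · rw [if_pos hlt, if_pos (by simp; omega)]
        congr 1
        omega
      · rw [if_neg hlt, if_neg (by simp; omega)]

theorem pv_add_map (f : String) :
    ∀ (n a j : Nat) (g : Nat → List String), j < n →
    pvAddToBucket ((List.range' a n).map g) j f
      = (List.range' a n).map (fun k => if k = a + j then g k ++ [f] else g k) := by
  intro n
  induction n with
  | zero => intro a j g h; omega
  | succ n ih =>
    intro a j g hj
    rw [List.range'_succ]
    simp only [List.map_cons]
    cases j with
    | zero =>
      rw [show pvAddToBucket (g a :: (List.range' (a + 1) n).map g) 0 f
            = (g a ++ [f]) :: (List.range' (a + 1) n).map g from rfl]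
      rw [if_pos (by omega)]
      congr 1
      apply List.map_congr_left
      intro k hk
      have : a + 1 ≤ k := by
        have := List.mem_range'_1.mp hk
        omega
      rw [if_neg (by omega)]
    | succ j =>
      rw [show pvAddToBucket (g a :: (List.range' (a + 1) n).map g) (j + 1) f
            = g a :: pvAddToBucket ((List.range' (a + 1) n).map g) j f from rfl]
      rw [ih (a + 1) j g (by omega)]
      rw [if_neg (by omega)]
      congr 1
      apply List.map_congr_left
      intro k hk
      by_cases hke : k = a + 1 + j
      · rw [if_pos hke, if_pos (by omega)]
      · rw [if_neg hke, if_neg (by omega)]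

theorem pv_fold_place :
    ∀ (l P : List String),
    l.foldl (fun bs f => pvPlace pvSortOrder 0 f bs)
        ((List.range' 0 pvSortOrder.length).map
          (fun k => P.filter (fun f => pvFirstKey pvSortOrder f == k)))
      = (List.range' 0 pvSortOrder.length).map
          (fun k => (P ++ l).filter (fun f => pvFirstKey pvSortOrder f == k)) := by
  intro l
  induction l with
  | nil => intro P; simp
  | cons f t ih =>
    intro P
    rw [List.foldl_cons]
    have hstep : pvPlace pvSortOrder 0 f
        ((List.range' 0 pvSortOrder.length).map
          (fun k => P.filter (fun f => pvFirstKey pvSortOrder f == k)))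
        = (List.range' 0 pvSortOrder.length).map
          (fun k => (P ++ [f]).filter (fun f => pvFirstKey pvSortOrder f == k)) := by
      rw [pv_place_eq]
      by_cases hlt : pvFirstKey pvSortOrder f < pvSortOrder.length
      · rw [if_pos hlt, Nat.zero_add]
        rw [pv_add_map f pvSortOrder.length 0 (pvFirstKey pvSortOrder f) _ hlt]
        apply List.map_congr_left
        intro k hk
        rw [List.filter_append]
        by_cases hke : k = 0 + pvFirstKey pvSortOrder f
        · rw [if_pos hke]
          have hb : (pvFirstKey pvSortOrder f == k) = true := by
            simp; omega
          simp [List.filter_cons, hb]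
        · rw [if_neg hke]
          have hb : (pvFirstKey pvSortOrder f == k) = false := by
            simp; omega
          simp [List.filter_cons, hb]
      · rw [if_neg hlt]
        apply List.map_congr_left
        intro k hk
        have hk16 : k < pvSortOrder.length := by
          have := List.mem_range'_1.mp hk
          omega
        rw [List.filter_append]
        have hb : (pvFirstKey pvSortOrder f == k) = false := by
          simp; omega
        simp [List.filter_cons, hb]
    rw [hstep, ih (P ++ [f])]
    congr 1
    funext k
    congr 1
    simp

theorem pv_alt_eq (l : List String) :
    sort_for_Aras_alt l
      = (List.range' 0 pvSortOrder.length).flatMap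
          (fun k => l.filter (fun f => pvFirstKey pvSortOrder f == k)) := by
  unfold sort_for_Aras_alt
  have hinit : pvSortOrder.map (fun _ => ([] : List String))
      = (List.range' 0 pvSortOrder.length).map
          (fun k => ([] : List String).filter (fun f => pvFirstKey pvSortOrder f == k)) := by
    simp
  rw [hinit, pv_fold_place l []]
  simp [List.flatMap_def]

-- ===== VERDICT (by name: the statement is the Claim_ definition above) =====
theorem sort_for_Aras_spec : Claim_equal_sort_for_Aras := by
  intro l _hdom hpre
  unfold Spec_sort_for_Aras
  show sort_for_Aras l = sort_for_Aras_alt l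
  unfold sort_for_Aras
  have hfst : (l.map (fun f => (f, pvFirstKey pvSortOrder f))).map Prod.fst = l := by
    rw [List.map_map]
    simp [Function.comp_def]
  have h := pv_fold_filter pvSortOrder.length 0 (by omega)
    (l.map (fun f => (f, pvFirstKey pvSortOrder f))) []
    (by intro p hp; obtain ⟨f, _, rfl⟩ := List.mem_map.mp hp; rfl)
    (by intro p _; omega)
    (by
      intro c hc
      rw [List.countP_map]
      have := hpre c (List.mem_range.mpr hc)
      simpa [Function.comp_def] using this)
  rw [List.drop_zero, hfst] at h
  rw [h, pv_alt_eq]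
  simp only [List.nil_append]
  apply List.flatMap_congr
  intro c _
  exact pv_pairs_filter l c
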